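-- pv_equiv track=rewrite | github.com/milenalilova/python-advanced-may-2022 | advanced_exams/retake_15_december_2021/north_pole_challenge.py | find_initial_position
-- ===== SOURCE A (Python) =====
-- def find_initial_position(matrix, rows, cols):
--     items_count = 0
--     start_row, start_col = None, None
--     for i in range(rows):
--         for j in range(cols):
--             if matrix[i][j] == 'Y':
--                 start_row, start_col = i, j
--             elif matrix[i][j] == 'D':
--                 items_count += 1
--             elif matrix[i][j] == 'G':
--                 items_count += 1
--             elif matrix[i][j] == 'C':
--                 items_count += 1
--     return start_row, start_col, items_count
-- ===== SOURCE B (Python) =====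
-- def find_initial_position(matrix, rows, cols):
--     # Two separate passes over the sliced region instead of one fused nested dispatch loop.
--     region = [row[:max(cols, 0)] for row in matrix[:max(rows, 0)]]
--     items_count = sum(row.count(c) for row in region for c in ('D', 'G', 'C'))
--     start_row, start_col = None, None
--     for i, row in enumerate(region):
--         if 'Y' in row:
--             start_row, start_col = i, len(row) - 1 - row[::-1].index('Y')
--     return start_row, start_col, items_count
-- ===== Notes on version B (the rewrite author's own statement) =====
-- stated objective: alternative
-- what changed: Replaces the single fused nested index loop with two differently-shaped passes over a pre-sliced region: items are counted via per-row count() sums, and the start cell is found per-row as the last 'Y' via a reversed index(), overwriting across rows.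
import Mathlib
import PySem

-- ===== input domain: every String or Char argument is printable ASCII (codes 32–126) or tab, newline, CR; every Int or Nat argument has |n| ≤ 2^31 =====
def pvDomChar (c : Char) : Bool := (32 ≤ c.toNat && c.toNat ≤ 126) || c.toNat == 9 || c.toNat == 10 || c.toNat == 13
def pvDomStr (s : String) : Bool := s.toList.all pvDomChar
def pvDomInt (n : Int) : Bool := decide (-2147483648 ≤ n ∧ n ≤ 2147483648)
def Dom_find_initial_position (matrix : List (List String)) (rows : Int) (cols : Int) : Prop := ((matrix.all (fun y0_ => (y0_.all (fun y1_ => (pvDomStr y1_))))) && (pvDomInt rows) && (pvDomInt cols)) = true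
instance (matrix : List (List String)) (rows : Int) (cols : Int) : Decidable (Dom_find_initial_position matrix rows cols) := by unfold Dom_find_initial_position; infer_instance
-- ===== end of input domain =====

-- B replaces A's single fused nested index loop by two differently-shaped passes over a
-- pre-sliced region (per-row count() sums for the items, per-row reversed index() for the
-- last 'Y'); same cost, alternative decomposition.

-- ===== PORT A =====
-- matrix[i][j] (raises IndexError out of range) is ported with pyGetD; exact under Pre_,
-- which admits exactly the inputs where every accessed index is in range.
def find_initial_position (matrix : List (List String)) (rows : Int) (cols : Int) : Option Int × Option Int × Int :=
  let st := (PySem.List.pyRange 0 rows 1).foldl (fun st i =>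
      (PySem.List.pyRange 0 cols 1).foldl (fun st j =>
        let v := PySem.List.pyGetD (PySem.List.pyGetD matrix i []) j ""
        if v = "Y" then (st.1, some i, some j)
        else if v = "D" then (st.1 + 1, st.2)
        else if v = "G" then (st.1 + 1, st.2)
        else if v = "C" then (st.1 + 1, st.2)
        else st) st)
    ((0 : Int), (none : Option Int), (none : Option Int))
  (st.2.1, st.2.2, st.1)

-- ===== PORT B =====
-- row[::-1] is ported as .reverse (exact: PySem.List.slice?_none_none_neg_one);
-- row[::-1].index('Y') is guarded by 'Y' in row, so the .getD 0 default is never taken.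
def find_initial_position_alt (matrix : List (List String)) (rows : Int) (cols : Int) : Option Int × Option Int × Int :=
  let region := (PySem.List.slice matrix none (some (max rows 0))).map
      (fun row => PySem.List.slice row none (some (max cols 0)))
  let items : Int := (region.flatMap (fun row => ["D", "G", "C"].map (fun c => (PySem.List.count row c : Int)))).sum
  let start := (PySem.List.enumerate region 0).foldl
      (fun st p => if p.2.contains "Y"
        then (some p.1, some ((p.2.length : Int) - 1 - (((PySem.List.index? p.2.reverse "Y").getD 0 : Nat) : Int)))
        else st)
      ((none : Option Int), (none : Option Int))
  (start.1, start.2, items)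

-- ===== PRECONDITION & SPEC =====
-- Pre_ excludes exactly the inputs on which A raises IndexError: 0 < rows and 0 < cols with
-- the matrix shorter than rows, or some of the first rows rows shorter than cols.
def Pre_find_initial_position (matrix : List (List String)) (rows : Int) (cols : Int) : Prop :=
  cols ≤ 0 ∨ rows ≤ 0 ∨ (rows.toNat ≤ matrix.length ∧ ∀ r ∈ matrix.take rows.toNat, cols.toNat ≤ r.length)
instance (matrix : List (List String)) (rows : Int) (cols : Int) : Decidable (Pre_find_initial_position matrix rows cols) := by unfold Pre_find_initial_position; infer_instance
def pvWitness_find_initial_position : List (List String) × Int × Int := ([["Y", "D"], ["C", "G"]], 2, 2)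


def Spec_find_initial_position (matrix : List (List String)) (rows : Int) (cols : Int) (out : Option Int × Option Int × Int) : Prop := out = find_initial_position_alt matrix rows cols
instance (matrix : List (List String)) (rows : Int) (cols : Int) (out : Option Int × Option Int × Int) : Decidable (Spec_find_initial_position matrix rows cols out) := by unfold Spec_find_initial_position; infer_instance

-- ===== CLAIM (what is proved, stated in full; the proofs are below) =====
def Claim_equal_find_initial_position : Prop := ∀ (matrix : List (List String)) (rows : Int) (cols : Int), Dom_find_initial_position matrix rows cols → Pre_find_initial_position matrix rows cols → Spec_find_initial_position matrix rows cols (find_initial_position matrix rows cols)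

-- ===== LEMMAS AND PROOFS =====

-- Items contributed by one (already sliced) row.
def pvCountDGC (r : List String) : Int := (r.count "D" : Int) + (r.count "G" : Int) + (r.count "C" : Int)

-- Index of the LAST "Y" in a row, if any.
def pvLastY : List String → Option Nat
  | [] => none
  | x :: xs => match pvLastY xs with
    | some j => some (j + 1)
    | none => if x = "Y" then some 0 else none

def pvStart (i : Int) (row : List String) (st : Option Int × Option Int) : Option Int × Option Int :=
  match pvLastY row with
  | some j => (some i, some (j : Int))
  | none => st

theorem pvLastY_append (l : List String) (x : String) :
    pvLastY (l ++ [x]) = if x = "Y" then some l.length else pvLastY l := by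
  induction l with
  | nil => simp [pvLastY]
  | cons a l ih =>
    simp only [List.cons_append, pvLastY, ih]
    by_cases hx : x = "Y" <;> simp [hx]

theorem pvLastY_eq_reverse_index (r : List String) :
    pvLastY r = (PySem.List.index? r.reverse "Y").map (fun k => r.length - 1 - k) := by
  induction r with
  | nil => simp [pvLastY]
  | cons a l ih =>
    by_cases hm : "Y" ∈ l
    · have hmr : "Y" ∈ l.reverse := by simpa using hm
      rw [List.reverse_cons, PySem.List.index?_append_of_mem _ hmr]
      cases h : PySem.List.index? l.reverse "Y" with
      | none => rw [PySem.List.index?_eq_none_iff _ _] at h; exact absurd hmr h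
      | some k =>
        obtain ⟨hk, _, _⟩ := PySem.List.getElem_of_index?_eq_some h
        rw [List.length_reverse] at hk
        rw [h] at ih
        simp only [pvLastY, ih, Option.map_some]
        simp only [List.length_cons]
        congr 1
        omega
    · have hmr : "Y" ∉ l.reverse := by simpa using hm
      have hln : PySem.List.index? l.reverse "Y" = none := (PySem.List.index?_eq_none_iff _ _).mpr hmr
      have hpl : pvLastY l = none := by rw [ih, hln]; rfl
      by_cases ha : a = "Y"
      · subst ha
        rw [List.reverse_cons, PySem.List.index?_append_singleton_self _ _ hmr]
        simp [pvLastY, hpl, List.length_reverse]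
      · have : PySem.List.index? (l.reverse ++ [a]) "Y" = none := by
          rw [PySem.List.index?_eq_none_iff _ _]
          simp only [List.mem_append, List.mem_singleton]
          rintro (h | h)
          · exact hmr h
          · exact ha h.symm
        rw [List.reverse_cons, this]
        simp [pvLastY, hpl, ha]


theorem pvBodyB_eq (st : Option Int × Option Int) (p : Int × List String) :
    (if p.2.contains "Y"
      then (some p.1, some (((p.2.length : Int)) - 1 - (((PySem.List.index? p.2.reverse "Y").getD 0 : Nat) : Int)))
      else st)
    = pvStart p.1 p.2 st := by
  cases h : PySem.List.index? p.2.reverse "Y" with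
  | none =>
    have hm : "Y" ∉ p.2 := by
      have := (PySem.List.index?_eq_none_iff _ _).mp h
      simpa using this
    have hc : p.2.contains "Y" = false := by simpa using hm
    have hl : pvLastY p.2 = none := by rw [pvLastY_eq_reverse_index, h]; rfl
    rw [if_neg (by simpa using hm)]
    simp [pvStart, hl]
  | some k =>
    have hm : "Y" ∈ p.2 := by
      have := (PySem.List.index?_isSome_iff p.2.reverse "Y").mp (by rw [h]; rfl)
      simpa using this
    have hc : p.2.contains "Y" = true := by simpa using hm
    obtain ⟨hk, -, -⟩ := PySem.List.getElem_of_index?_eq_some h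
    rw [List.length_reverse] at hk
    have hl : pvLastY p.2 = some (p.2.length - 1 - k) := by
      rw [pvLastY_eq_reverse_index, h]; rfl
    simp only [hc, if_true, pvStart, hl, h, Option.getD_some]
    refine Prod.ext rfl ?_
    simp only [Option.some.injEq]
    push_cast
    omega

theorem pvFoldl_id {α β : Type} (l : List α) (s : β) :
    l.foldl (fun st _ => st) s = s := by
  induction l generalizing s with
  | nil => rfl
  | cons a t ih => simpa using ih s

theorem pvStartFold_empty (l : List (List String)) (s : Int) (st : Option Int × Option Int)
    (h : ∀ row ∈ l, row = []) :
    (PySem.List.enumerate l s).foldl (fun st p => pvStart p.1 p.2 st) st = st := by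
  induction l generalizing s with
  | nil => simp [PySem.List.enumerate]
  | cons r t ih =>
    rw [PySem.List.enumerate_cons, List.foldl_cons]
    have hr : r = [] := h r (List.mem_cons_self)
    subst hr
    rw [show pvStart s [] st = st from rfl]
    exact ih (s + 1) (fun row hrow => h row (List.mem_cons_of_mem _ hrow))

theorem pvItems_eq (region : List (List String)) :
    (region.flatMap (fun row => ["D", "G", "C"].map (fun c => (PySem.List.count row c : Int)))).sum
    = (region.map pvCountDGC).sum := by
  induction region with
  | nil => rfl
  | cons r t ih =>
    rw [List.flatMap_cons, List.sum_append, ih, List.map_cons, List.sum_cons]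
    simp only [List.map_cons, List.map_nil, List.sum_cons, List.sum_nil, pvCountDGC,
      PySem.List.count_eq]
    ring

theorem pvInner (r : List String) (i : Int) (n : Nat) (hn : n ≤ r.length)
    (st : Int × Option Int × Option Int) :
    ((List.range n).map (fun k => ((k : Nat) : Int))).foldl
      (fun st j =>
        let v := PySem.List.pyGetD r j ""
        if v = "Y" then (st.1, some i, some j)
        else if v = "D" then (st.1 + 1, st.2)
        else if v = "G" then (st.1 + 1, st.2)
        else if v = "C" then (st.1 + 1, st.2)
        else st) st
    = (st.1 + pvCountDGC (List.take n r), pvStart i (List.take n r) st.2) := by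
  induction n with
  | zero => simp [pvCountDGC, pvStart, pvLastY]
  | succ m ih =>
    have hm : m < r.length := by omega
    rw [List.range_succ, List.map_append, List.foldl_append, ih (by omega)]
    have htake : r.take (m + 1) = r.take m ++ [r[m]] := by
      rw [List.take_succ, List.getElem?_eq_getElem hm]
      rfl
    have hlen : (r.take m).length = m := by
      rw [List.length_take]; omega
    rw [htake]
    simp only [List.map_cons, List.map_nil, List.foldl_cons, List.foldl_nil]
    rw [PySem.List.pyGetD_natCast, List.getD_eq_getElem r "" hm]
    have hstart : ∀ (v : String) (s : Option Int × Option Int),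
        pvStart i (r.take m ++ [v]) s
        = if v = "Y" then (some i, some ((m : Nat) : Int)) else pvStart i (r.take m) s := by
      intro v s
      have hstep : pvLastY (r.take m ++ [v]) = if v = "Y" then some m else pvLastY (r.take m) := by
        rw [pvLastY_append, hlen]
      by_cases hv : v = "Y"
      · subst hv
        simp [pvStart, hstep]
      · simp [pvStart, hstep, hv]
    have hcount : pvCountDGC (r.take m ++ [r[m]])
        = pvCountDGC (r.take m)
          + (if r[m] = "D" then 1 else if r[m] = "G" then 1 else if r[m] = "C" then 1 else 0) := by
      simp only [pvCountDGC, List.count_append, List.count_cons, List.count_nil]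
      by_cases hD : r[m] = "D"
      · simp [hD] <;> push_cast <;> ring
      · by_cases hG : r[m] = "G"
        · simp [hD, hG] <;> push_cast <;> ring
        · by_cases hC : r[m] = "C"
          · simp [hD, hG, hC] <;> push_cast <;> ring
          · simp [hD, hG, hC] <;> push_cast <;> ring
    rw [hcount, hstart]
    by_cases hY : r[m] = "Y"
    · simp [hY] <;> push_cast <;> ring
    · by_cases hD : r[m] = "D"
      · simp [hY, hD] <;> push_cast <;> ring
      · by_cases hG : r[m] = "G"
        · simp [hY, hD, hG] <;> push_cast <;> ring
        · by_cases hC : r[m] = "C"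
          · simp [hY, hD, hG, hC] <;> push_cast <;> ring
          · simp [hY, hD, hG, hC] <;> push_cast <;> ring

theorem pvOuter (matrix : List (List String)) (cols : Int)
    (m : Nat) (hm : m ≤ matrix.length)
    (hc : ∀ r ∈ matrix.take m, cols.toNat ≤ r.length)
    (st : Int × Option Int × Option Int) :
    ((List.range m).map (fun k => ((k : Nat) : Int))).foldl
      (fun st i => (PySem.List.pyRange 0 cols 1).foldl (fun st j =>
          let v := PySem.List.pyGetD (PySem.List.pyGetD matrix i []) j ""
          if v = "Y" then (st.1, some i, some j)
          else if v = "D" then (st.1 + 1, st.2)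
          else if v = "G" then (st.1 + 1, st.2)
          else if v = "C" then (st.1 + 1, st.2)
          else st) st) st
    = (st.1 + (((matrix.take m).map (fun r => r.take cols.toNat)).map pvCountDGC).sum,
       (PySem.List.enumerate ((matrix.take m).map (fun r => r.take cols.toNat)) 0).foldl
         (fun st p => pvStart p.1 p.2 st) st.2) := by
  induction m with
  | zero => simp [PySem.List.enumerate]
  | succ m ih =>
    have hm' : m < matrix.length := by omega
    have htake : matrix.take (m + 1) = matrix.take m ++ [matrix[m]] := by
      rw [List.take_succ, List.getElem?_eq_getElem hm']
      rfl
    have hlenr : ((matrix.take m).map (fun r => r.take cols.toNat)).length = m := by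
      rw [List.length_map, List.length_take]; omega
    have hcm : ∀ r ∈ matrix.take m, cols.toNat ≤ r.length := by
      intro r hr
      exact hc r (by rw [htake]; exact List.mem_append_left _ hr)
    have hcrow : cols.toNat ≤ (matrix[m]).length := by
      refine hc matrix[m] ?_
      rw [htake]
      exact List.mem_append_right _ (List.mem_singleton.mpr rfl)
    rw [List.range_succ, List.map_append, List.foldl_append, ih (by omega) hcm]
    simp only [List.map_cons, List.map_nil, List.foldl_cons, List.foldl_nil]
    have hpyr : PySem.List.pyRange 0 cols 1
        = (List.range cols.toNat).map (fun k => ((k : Nat) : Int)) := by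
      rw [PySem.List.pyRange_one]
      simp
    rw [hpyr, PySem.List.pyGetD_natCast, List.getD_eq_getElem matrix [] hm',
      pvInner matrix[m] ((m : Nat) : Int) cols.toNat hcrow]
    rw [htake]
    simp only [List.map_append, List.map_cons, List.map_nil,
      PySem.List.enumerate_append, List.foldl_append, List.sum_append,
      List.sum_cons, List.sum_nil, hlenr, PySem.List.enumerate_cons,
      PySem.List.enumerate_nil, List.foldl_cons, List.foldl_nil]
    refine Prod.ext ?_ ?_
    · simp; ring
    · simp


-- ===== VERDICT (by name: the statement is the Claim_ definition above) =====
theorem find_initial_position_spec : Claim_equal_find_initial_position := by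
  intro matrix rows cols _ hpre
  unfold Spec_find_initial_position
  simp only [find_initial_position, find_initial_position_alt]
  have hsl1 : PySem.List.slice matrix none (some (max rows 0)) = matrix.take rows.toNat := by
    rw [PySem.List.slice_to matrix (le_max_right rows 0)]
    congr 1
    omega
  have hsl2 : ∀ xs : List String,
      PySem.List.slice xs none (some (max cols 0)) = xs.take cols.toNat := by
    intro xs
    rw [PySem.List.slice_to xs (le_max_right cols 0)]
    congr 1
    omega
  simp only [hsl1, hsl2]
  have hfun : (fun (st : Option Int × Option Int) (p : Int × List String) =>
      if p.2.contains "Y"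
      then (some p.1, some (((p.2.length : Int)) - 1 - (((PySem.List.index? p.2.reverse "Y").getD 0 : Nat) : Int)))
      else st) = fun st p => pvStart p.1 p.2 st := by
    funext st p
    exact pvBodyB_eq st p
  rw [hfun, pvItems_eq]
  by_cases hc0 : cols ≤ 0
  · have hcz : cols.toNat = 0 := by omega
    have hpr : PySem.List.pyRange 0 cols 1 = [] := by
      rw [PySem.List.pyRange_one]
      simp [hcz]
    simp only [hpr, List.foldl_nil, pvFoldl_id]
    have hall : ∀ row ∈ (matrix.take rows.toNat).map (fun r => r.take cols.toNat), row = [] := by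
      intro row hrow
      obtain ⟨r, -, hr⟩ := List.mem_map.mp hrow
      rw [← hr, hcz, List.take_zero]
    rw [pvStartFold_empty _ _ _ hall]
    have hsum : (((matrix.take rows.toNat).map (fun r => r.take cols.toNat)).map pvCountDGC).sum = 0 := by
      rw [List.sum_eq_zero]
      intro x hx
      obtain ⟨row, hrow, hxx⟩ := List.mem_map.mp hx
      rw [hall row hrow] at hxx
      simp [pvCountDGC] at hxx
      omega
    rw [hsum]
  · by_cases hr0 : rows ≤ 0
    · have hrz : rows.toNat = 0 := by omega
      have hpr : PySem.List.pyRange 0 rows 1 = [] := by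
        rw [PySem.List.pyRange_one]
        simp [hrz]
      simp [hpr, hrz, PySem.List.enumerate_nil]
    · obtain h3 : rows.toNat ≤ matrix.length ∧ ∀ r ∈ matrix.take rows.toNat, cols.toNat ≤ r.length := by
        rcases hpre with h | h | h
        · omega
        · omega
        · exact h
      have hpyr : PySem.List.pyRange 0 rows 1
          = (List.range rows.toNat).map (fun k => ((k : Nat) : Int)) := by
        rw [PySem.List.pyRange_one]
        simp
      rw [hpyr, pvOuter matrix cols rows.toNat h3.1 h3.2]
      simp
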